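-- pv_equiv track=rewrite | github.com/sakshidangi002/Resumes-analyzer | backend/resume_parser_v2.py | boost_domain_skills_v2
-- ===== SOURCE A (Python) =====
-- def boost_domain_skills_v2(
--     primary_skills: list[str],
--     other_skills: list[str],
--     boost_skills: list[str],
-- ) -> tuple[list[str], list[str]]:
--     """
--     Promote domain-relevant skills to the front of primary_skills.
--     """
--     if not boost_skills:
--         return primary_skills, other_skills
--
--     existing_lower = {s.lower() for s in primary_skills}
--     for skill in boost_skills:
--         if skill.lower() in existing_lower:
--             # Already in primary, move to front
--             for i, s in enumerate(primary_skills):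
--                 if s.lower() == skill.lower():
--                     primary_skills.insert(0, primary_skills.pop(i))
--                     break
--         elif any(s.lower() == skill.lower() for s in other_skills):
--             # Promote from other_skills to primary
--             for i, s in enumerate(other_skills):
--                 if s.lower() == skill.lower():
--                     primary_skills.insert(0, other_skills.pop(i))
--                     existing_lower.add(skill.lower())
--                     break
--
--     return primary_skills, other_skills
-- ===== SOURCE B (Python) =====
-- def boost_domain_skills_v2(
--     primary_skills: list[str],
--     other_skills: list[str],
--     boost_skills: list[str],
-- ) -> tuple[list[str], list[str]]:
--     """
--     Promote domain-relevant skills to the front of primary_skills.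
--     One pass per input list: lowercase->first-occurrence maps replace the
--     inner scans, and the move-to-front sequence is realised as a dict used
--     as an ordered map (re-touch = move to end), read out in reverse.
--     Like A, mutates the two input lists in place (via slice assignment).
--     """
--     if not boost_skills:
--         return primary_skills, other_skills
--
--     prim_first: dict[str, str] = {}
--     for s in primary_skills:
--         prim_first.setdefault(s.lower(), s)
--     other_first: dict[str, str] = {}
--     for s in other_skills:
--         other_first.setdefault(s.lower(), s)
--
--     touched: dict[str, str] = {}   # lower -> chosen element, in last-touch order
--     taken: set[str] = set()        # lowers promoted out of other_skills
--     for skill in boost_skills: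
--         k = skill.lower()
--         if k in touched:
--             touched[k] = touched.pop(k)          # move to end
--         elif k in prim_first:
--             touched[k] = prim_first[k]
--         elif k in other_first:
--             touched[k] = other_first[k]
--             taken.add(k)
--
--     front = list(reversed(touched.values()))
--     from_prim = {k for k in touched if k not in taken}
--     primary_skills[:] = front + _remove_firsts(primary_skills, from_prim)
--     other_skills[:] = _remove_firsts(other_skills, taken)
--     return primary_skills, other_skills
--
--
-- def _remove_firsts(xs: list[str], lowers: set[str]) -> list[str]:
--     """Drop, for each lower in `lowers`, the first element of xs with that lower."""
--     pending = set(lowers)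
--     out = []
--     for s in xs:
--         k = s.lower()
--         if k in pending:
--             pending.discard(k)
--         else:
--             out.append(s)
--     return out
-- ===== Notes on version B (the rewrite author's own statement) =====
-- stated objective: faster
-- what changed: Replaces A's per-boost-skill linear scans of primary/other (and list insert/pop) by precomputed lowercase->first-occurrence dicts plus a single ordered-dict pass (re-touch = move to end) whose values, read out in reverse, form the new front; removed elements are dropped in one final pass per list.
import Mathlib
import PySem

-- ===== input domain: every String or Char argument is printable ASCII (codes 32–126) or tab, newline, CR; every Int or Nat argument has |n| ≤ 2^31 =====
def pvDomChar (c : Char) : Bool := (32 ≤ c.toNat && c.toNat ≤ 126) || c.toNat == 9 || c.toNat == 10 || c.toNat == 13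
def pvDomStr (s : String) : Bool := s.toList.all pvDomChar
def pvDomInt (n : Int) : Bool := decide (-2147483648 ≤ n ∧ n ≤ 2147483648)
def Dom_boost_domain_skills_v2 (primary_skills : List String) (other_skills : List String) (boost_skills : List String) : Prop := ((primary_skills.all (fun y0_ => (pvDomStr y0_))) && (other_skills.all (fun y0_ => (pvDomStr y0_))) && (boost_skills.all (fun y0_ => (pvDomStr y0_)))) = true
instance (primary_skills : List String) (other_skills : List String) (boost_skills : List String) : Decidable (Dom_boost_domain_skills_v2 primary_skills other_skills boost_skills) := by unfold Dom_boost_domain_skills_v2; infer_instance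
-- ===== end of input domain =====

-- B replaces A's per-boost-skill inner scans by precomputed lowercase->first-occurrence
-- maps and one ordered-dict pass (move-to-end, read out reversed); equivalence is about
-- the RETURN value (the Python A mutates its two list arguments in place; the Python B
-- performs the same in-place update via slice assignment).

-- ===== PORT A =====
-- inner 'for i, s in enumerate(xs): if s.lower() == key: xs.pop(i); break' —
-- returns the first element whose lower equals key, and the list without it
def pvExtractFirst (key : String) : List String → Option (String × List String)
  | [] => none
  | x :: rest =>
    if PySem.Str.lower x == key then some (x, rest)
    else (pvExtractFirst key rest).map (fun p => (p.1, x :: p.2))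

def pvAStep (st : List String × List String × PySem.Set String) (skill : String) :
    List String × List String × PySem.Set String :=
  let k := PySem.Str.lower skill
  if PySem.Set.contains st.2.2 k then
    match pvExtractFirst k st.1 with
    | some (y, rest) => (y :: rest, st.2.1, st.2.2)
    | none => st
  else if st.2.1.any (fun s => PySem.Str.lower s == k) then
    match pvExtractFirst k st.2.1 with
    | some (y, rest) => (y :: st.1, rest, PySem.Set.add st.2.2 k)
    | none => st
  else st

def boost_domain_skills_v2 (primary_skills : List String) (other_skills : List String) (boost_skills : List String) : List String × List String :=
  if boost_skills.isEmpty then (primary_skills, other_skills)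
  else
    let st := boost_skills.foldl pvAStep
      (primary_skills, other_skills, PySem.Set.ofList (primary_skills.map PySem.Str.lower))
    (st.1, st.2.1)

-- ===== PORT B =====
-- lowercase -> first occurrence (dict built with setdefault)
def pvFirstMap (xs : List String) : PySem.Dict String String :=
  xs.foldl (fun d s => d.setdefault (PySem.Str.lower s) s) (PySem.Dict.mk [])

-- one step of the boost loop on state (touched, taken)
def pvBStep (primFirst otherFirst : PySem.Dict String String)
    (st : PySem.Dict String String × PySem.Set String) (skill : String) :
    PySem.Dict String String × PySem.Set String :=
  let k := PySem.Str.lower skill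
  match st.1.pop? k with
  | some (v, d') => (d'.insert k v, st.2)          -- touched[k] = touched.pop(k)
  | none =>
    if primFirst.contains k then
      match primFirst.get? k with
      | some v => (st.1.insert k v, st.2)
      | none => st                                  -- unreachable: contains = isSome get?
    else
      match otherFirst.get? k with
      | some v => (st.1.insert k v, PySem.Set.add st.2 k)
      | none => st

-- _remove_firsts from Source B
def pvRemoveFirsts : List String → PySem.Set String → List String
  | [], _ => []
  | s :: rest, pending =>
    if PySem.Set.contains pending (PySem.Str.lower s) then
      pvRemoveFirsts rest (PySem.Set.discard pending (PySem.Str.lower s))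
    else s :: pvRemoveFirsts rest pending

-- {k for k in touched if k not in taken}
def pvFromPrim (touched : PySem.Dict String String) (taken : PySem.Set String) : PySem.Set String :=
  PySem.Set.ofList (touched.keys.filter (fun k => !(PySem.Set.contains taken k)))

def boost_domain_skills_v2_alt (primary_skills : List String) (other_skills : List String) (boost_skills : List String) : List String × List String :=
  if boost_skills.isEmpty then (primary_skills, other_skills)
  else
    let primFirst := pvFirstMap primary_skills
    let otherFirst := pvFirstMap other_skills
    let st := boost_skills.foldl (pvBStep primFirst otherFirst) (PySem.Dict.mk [], PySem.Set.empty)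
    let front := st.1.values.reverse
    (front ++ pvRemoveFirsts primary_skills (pvFromPrim st.1 st.2),
     pvRemoveFirsts other_skills st.2)

-- ===== PRECONDITION & SPEC =====
def Spec_boost_domain_skills_v2 (primary_skills : List String) (other_skills : List String) (boost_skills : List String) (out : List String × List String) : Prop := out = boost_domain_skills_v2_alt primary_skills other_skills boost_skills
instance (primary_skills : List String) (other_skills : List String) (boost_skills : List String) (out : List String × List String) : Decidable (Spec_boost_domain_skills_v2 primary_skills other_skills boost_skills out) := by unfold Spec_boost_domain_skills_v2; infer_instance

-- ===== CLAIM (what is proved, stated in full; the proofs are below) =====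
def Claim_equal_boost_domain_skills_v2 : Prop := ∀ (primary_skills : List String) (other_skills : List String) (boost_skills : List String), Dom_boost_domain_skills_v2 primary_skills other_skills boost_skills → Spec_boost_domain_skills_v2 primary_skills other_skills boost_skills (boost_domain_skills_v2 primary_skills other_skills boost_skills)

-- ===== LEMMAS AND PROOFS =====

-- the loop invariant tying A's state (prim, oth, existing_lower) to B's (touched, taken)
def pvInv (P0 O0 : List String) (a : List String × List String × PySem.Set String)
    (b : PySem.Dict String String × PySem.Set String) : Prop :=
  a.1 = b.1.values.reverse ++ pvRemoveFirsts P0 (pvFromPrim b.1 b.2)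
  ∧ a.2.1 = pvRemoveFirsts O0 b.2
  ∧ (∀ x, x ∈ a.2.2 ↔ (x ∈ P0.map PySem.Str.lower ∨ x ∈ b.2))
  ∧ (∀ p ∈ b.1.items, PySem.Str.lower p.2 = p.1)
  ∧ (b.1.items.map Prod.fst).Nodup
  ∧ (∀ x ∈ b.2, x ∈ b.1.items.map Prod.fst ∧ x ∉ P0.map PySem.Str.lower)
  ∧ (∀ x ∈ b.1.items.map Prod.fst, x ∈ P0.map PySem.Str.lower ∨ x ∈ b.2)

theorem pv_ef_lower {k v : String} {xs ys : List String}
    (h : pvExtractFirst k xs = some (v, ys)) : PySem.Str.lower v = k := by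
  induction xs generalizing ys with
  | nil => simp [pvExtractFirst] at h
  | cons x rest ih =>
    simp only [pvExtractFirst] at h
    split at h
    · rename_i hx
      simp only [Option.some.injEq, Prod.mk.injEq] at h
      rw [← h.1]; exact beq_iff_eq.mp hx
    · cases hr : pvExtractFirst k rest with
      | none => rw [hr] at h; simp at h
      | some p =>
        rw [hr] at h
        simp only [Option.map_some, Option.some.injEq, Prod.mk.injEq] at h
        have h2 : pvExtractFirst k rest = some (v, p.2) := by rw [hr, ← h.1]
        exact ih h2

theorem pv_ef_none_iff {k : String} {xs : List String} :
    pvExtractFirst k xs = none ↔ k ∉ xs.map PySem.Str.lower := by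
  induction xs with
  | nil => simp [pvExtractFirst]
  | cons x rest ih =>
    simp only [pvExtractFirst, List.map_cons, List.mem_cons]
    split
    · rename_i hx
      simp only [beq_iff_eq] at hx
      simp [hx]
    · rename_i hx
      simp only [beq_iff_eq] at hx
      cases hr : pvExtractFirst k rest with
      | none =>
        rw [hr] at ih
        simp only [Option.map_none, true_iff]
        rintro (h1 | h2)
        · exact hx h1.symm
        · exact (ih.mp rfl) h2
      | some p =>
        rw [hr] at ih
        simp only [Option.map_some, reduceCtorEq, false_iff, not_not] at ih ⊢
        exact Or.inr ih

theorem pv_ef_append_nomatch {k : String} {front rest : List String}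
    (h : ∀ x ∈ front, PySem.Str.lower x ≠ k) :
    pvExtractFirst k (front ++ rest) =
      (pvExtractFirst k rest).map (fun p => (p.1, front ++ p.2)) := by
  induction front with
  | nil =>
    simp only [List.nil_append]
    cases pvExtractFirst k rest <;> simp
  | cons x f ih =>
    have hx : PySem.Str.lower x ≠ k := h x (by simp)
    have hf : ∀ y ∈ f, PySem.Str.lower y ≠ k := fun y hy => h y (by simp [hy])
    simp only [List.cons_append, pvExtractFirst, beq_iff_eq, if_neg hx, ih hf]
    cases pvExtractFirst k rest <;> simp

theorem pv_set_mem_contains {s : PySem.Set String} {a : String} :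
    PySem.Set.contains s a = true ↔ a ∈ s := by
  simp [PySem.Set.contains]

theorem pv_set_mem_add {s : PySem.Set String} {x a : String} :
    a ∈ PySem.Set.add s x ↔ (a ∈ s ∨ a = x) := by
  unfold PySem.Set.add
  split
  · rename_i hc
    have : x ∈ s := by simpa [PySem.Set.contains] using hc
    constructor
    · exact Or.inl
    · rintro (h | rfl)
      · exact h
      · exact this
  · simp

theorem pv_set_mem_discard {s : PySem.Set String} {x a : String} :
    a ∈ PySem.Set.discard s x ↔ (a ∈ s ∧ a ≠ x) := by
  simp [PySem.Set.discard]

theorem pv_rf_congr {xs : List String} {S S' : PySem.Set String}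
    (h : ∀ a, a ∈ S ↔ a ∈ S') : pvRemoveFirsts xs S = pvRemoveFirsts xs S' := by
  induction xs generalizing S S' with
  | nil => rfl
  | cons x rest ih =>
    by_cases hm : PySem.Str.lower x ∈ S
    · rw [pvRemoveFirsts, pvRemoveFirsts, if_pos (pv_set_mem_contains.mpr hm),
        if_pos (pv_set_mem_contains.mpr ((h _).mp hm))]
      exact ih (fun a => by simp only [pv_set_mem_discard, h a])
    · have hm' : PySem.Str.lower x ∉ S' := fun hx => hm ((h _).mpr hx)
      rw [pvRemoveFirsts, pvRemoveFirsts, if_neg (fun hc => hm (pv_set_mem_contains.mp hc)),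
        if_neg (fun hc => hm' (pv_set_mem_contains.mp hc))]
      rw [ih h]

theorem pv_rf_empty_pending {xs : List String} {S : PySem.Set String}
    (h : ∀ a, a ∉ S) : pvRemoveFirsts xs S = xs := by
  induction xs with
  | nil => rfl
  | cons x rest ih =>
    rw [pvRemoveFirsts, if_neg (fun hc => h _ (pv_set_mem_contains.mp hc)), ih]

theorem pv_rf_extract_some {k v : String} {xs ys : List String} {S : PySem.Set String}
    (hk : k ∉ S) (h : pvExtractFirst k xs = some (v, ys)) :
    pvExtractFirst k (pvRemoveFirsts xs S) = some (v, pvRemoveFirsts xs (PySem.Set.add S k)) := by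
  induction xs generalizing ys S with
  | nil => simp [pvExtractFirst] at h
  | cons x rest ih =>
    simp only [pvExtractFirst] at h
    by_cases hxk : PySem.Str.lower x = k
    · -- head matches: v = x, ys = rest
      rw [if_pos (beq_iff_eq.mpr hxk)] at h
      simp only [Option.some.injEq, Prod.mk.injEq] at h
      obtain ⟨rfl, rfl⟩ := h
      -- lower x = k ∉ S
      rw [pvRemoveFirsts, if_neg (by rw [hxk]; exact fun hc => hk (pv_set_mem_contains.mp hc))]
      rw [pvExtractFirst, if_pos (beq_iff_eq.mpr hxk)]
      rw [pvRemoveFirsts, if_pos (by rw [hxk]; exact pv_set_mem_contains.mpr (pv_set_mem_add.mpr (Or.inr rfl)))]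
      have hcongr : pvRemoveFirsts rest (PySem.Set.discard (PySem.Set.add S k) (PySem.Str.lower x)) = pvRemoveFirsts rest S := by
        apply pv_rf_congr
        intro a
        simp only [pv_set_mem_discard, pv_set_mem_add, hxk]
        constructor
        · rintro ⟨h1 | rfl, h2⟩
          · exact h1
          · exact absurd rfl h2
        · intro ha; exact ⟨Or.inl ha, fun hek => hk (hek ▸ ha)⟩
      rw [hcongr]
    · rw [if_neg (by simpa using hxk)] at h
      cases hr : pvExtractFirst k rest with
      | none => rw [hr] at h; simp at h
      | some p =>
        rw [hr] at h
        simp only [Option.map_some, Option.some.injEq, Prod.mk.injEq] at h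
        have hrest : pvExtractFirst k rest = some (v, p.2) := by rw [hr, ← h.1]
        by_cases hmem : PySem.Str.lower x ∈ S
        · -- removed element
          rw [pvRemoveFirsts, if_pos (pv_set_mem_contains.mpr hmem)]
          have hk' : k ∉ PySem.Set.discard S (PySem.Str.lower x) := by
            simp only [pv_set_mem_discard]; rintro ⟨h1, -⟩; exact hk h1
          rw [ih hk' hrest]
          rw [pvRemoveFirsts, if_pos (pv_set_mem_contains.mpr (pv_set_mem_add.mpr (Or.inl hmem)))]
          have : pvRemoveFirsts rest (PySem.Set.discard (PySem.Set.add S k) (PySem.Str.lower x)) =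
              pvRemoveFirsts rest (PySem.Set.add (PySem.Set.discard S (PySem.Str.lower x)) k) := by
            apply pv_rf_congr
            intro a
            simp only [pv_set_mem_discard, pv_set_mem_add]
            constructor
            · rintro ⟨h1 | rfl, h2⟩
              · exact Or.inl ⟨h1, h2⟩
              · exact Or.inr rfl
            · rintro (⟨h1, h2⟩ | rfl)
              · exact ⟨Or.inl h1, h2⟩
              · exact ⟨Or.inr rfl, hxk ∘ Eq.symm⟩
          rw [this]
        · -- kept element
          rw [pvRemoveFirsts, if_neg (fun hc => hmem (pv_set_mem_contains.mp hc))]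
          rw [pvExtractFirst, if_neg (by simpa using hxk), ih hk hrest]
          have hnot : PySem.Str.lower x ∉ PySem.Set.add S k := by
            simp only [pv_set_mem_add]; rintro (h1 | h1); exact hmem h1; exact hxk h1
          rw [pvRemoveFirsts, if_neg (fun hc => hnot (pv_set_mem_contains.mp hc))]
          rfl

theorem pv_rf_extract_none {k : String} {xs : List String} {S : PySem.Set String}
    (h : pvExtractFirst k xs = none) :
    pvExtractFirst k (pvRemoveFirsts xs S) = none := by
  induction xs generalizing S with
  | nil => rfl
  | cons x rest ih =>
    simp only [pvExtractFirst] at h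
    split at h
    · simp at h
    · have hrest : pvExtractFirst k rest = none := by
        cases hr : pvExtractFirst k rest with
        | none => rfl
        | some p => rw [hr] at h; simp at h
      rw [pvRemoveFirsts]
      split
      · exact ih hrest
      · rename_i hcond
        rw [pvExtractFirst, if_neg (by assumption), ih hrest]
        rfl

theorem pv_fm_get_aux (xs : List String) (d : PySem.Dict String String) (k : String) :
    (xs.foldl (fun d s => d.setdefault (PySem.Str.lower s) s) d).get? k =
      (d.get? k).or ((pvExtractFirst k xs).map Prod.fst) := by
  induction xs generalizing d with
  | nil => simp [pvExtractFirst]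
  | cons x rest ih =>
    rw [List.foldl_cons, ih]
    by_cases hxk : PySem.Str.lower x = k
    · subst hxk
      rw [PySem.Dict.get?_setdefault_self]
      simp only [pvExtractFirst, beq_self_eq_true, if_pos]
      cases hd : d.get? (PySem.Str.lower x) <;> simp
    · rw [PySem.Dict.get?_setdefault_of_ne _ _ (Ne.symm hxk)]
      congr 1
      cases hr : pvExtractFirst k rest <;> simp [pvExtractFirst, hxk, hr]

theorem pv_fm_get (xs : List String) (k : String) :
    (pvFirstMap xs).get? k = (pvExtractFirst k xs).map Prod.fst := by
  rw [pvFirstMap, pv_fm_get_aux]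
  simp [PySem.Dict.get?]

theorem pv_dict_decomp {d : PySem.Dict String String} {k v : String}
    (hget : d.get? k = some v) :
    ∃ pre post, d.items = pre ++ (k, v) :: post ∧ (∀ p ∈ pre, p.1 ≠ k) := by
  obtain ⟨items⟩ := d
  induction items with
  | nil => simp [PySem.Dict.get?] at hget
  | cons p rest ih =>
    by_cases hp : p.1 = k
    · refine ⟨[], rest, ?_, by simp⟩
      rw [PySem.Dict.get?, List.find?_cons_of_pos (by simpa using hp)] at hget
      simp only [Option.map_some, Option.some.injEq] at hget
      simp [← hp, ← hget]
    · rw [PySem.Dict.get?, List.find?_cons_of_neg (by simpa using hp)] at hget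
      obtain ⟨pre, post, heq, hpre⟩ := ih (by rw [PySem.Dict.get?]; exact hget)
      refine ⟨p :: pre, post, ?_, ?_⟩
      · simpa using congrArg (p :: ·) heq
      · intro q hq'
        rcases List.mem_cons.mp hq' with h1 | h2
        · rw [h1]; exact hp
        · exact hpre q h2

theorem pv_mem_fromPrim {T : PySem.Dict String String} {tk : PySem.Set String} {a : String} :
    a ∈ pvFromPrim T tk ↔ (a ∈ T.items.map Prod.fst ∧ a ∉ tk) := by
  unfold pvFromPrim
  rw [PySem.Set.mem_ofList (T.keys.filter (fun k => !(PySem.Set.contains tk k))) a]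
  simp [List.mem_filter, PySem.Dict.keys, PySem.Set.contains]

theorem pv_dict_get?_none_iff {d : PySem.Dict String String} {k : String} :
    d.get? k = none ↔ k ∉ d.items.map Prod.fst := by
  simp only [PySem.Dict.get?, Option.map_eq_none_iff, List.find?_eq_none, List.mem_map, beq_iff_eq]
  constructor
  · rintro h ⟨p, hp, rfl⟩
    exact h p hp rfl
  · rintro h p hp he
    exact h ⟨p, hp, he⟩

theorem pv_dict_contains_false {d : PySem.Dict String String} {k : String}
    (h : k ∉ d.items.map Prod.fst) : d.contains k = false := by
  simp only [PySem.Dict.contains, List.any_eq_false]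
  intro p hp
  simp only [beq_iff_eq]
  exact fun he => h (List.mem_map.mpr ⟨p, hp, he⟩)

theorem pv_ef_mem_of_some {k : String} {xs : List String} {p : String × List String}
    (h : pvExtractFirst k xs = some p) : k ∈ xs.map PySem.Str.lower := by
  by_contra hn
  rw [pv_ef_none_iff.mpr hn] at h
  simp at h

theorem pv_step_inv (P0 O0 : List String) (a : List String × List String × PySem.Set String)
    (b : PySem.Dict String String × PySem.Set String) (skill : String)
    (h : pvInv P0 O0 a b) :
    pvInv P0 O0 (pvAStep a skill) (pvBStep (pvFirstMap P0) (pvFirstMap O0) b skill) := by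
  obtain ⟨prim, oth, ex⟩ := a
  obtain ⟨T, tk⟩ := b
  obtain ⟨h1, h2, h3, h4, h5, h6, h7⟩ := h
  simp only at h1 h2 h3 h4 h5 h6 h7
  subst h1 h2
  cases hg : T.get? (PySem.Str.lower skill) with
  | some v =>
    -- re-touched key: move-to-front / move-to-end
    obtain ⟨pre, post, hitems, hpre⟩ := pv_dict_decomp hg
    have hnodup0 : (pre.map Prod.fst ++ PySem.Str.lower skill :: post.map Prod.fst).Nodup := by
      simpa [hitems] using h5
    have hpost : ∀ p ∈ post, p.1 ≠ PySem.Str.lower skill := by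
      intro p hp he
      have := (List.Nodup.of_append_right hnodup0)
      rw [List.nodup_cons] at this
      exact this.1 (List.mem_map.mpr ⟨p, hp, he⟩)
    have hfil : ∀ (l : List (String × String)), (∀ p ∈ l, p.1 ≠ PySem.Str.lower skill) →
        l.filter (fun p => !(p.1 == PySem.Str.lower skill)) = l :=
      fun l hl => List.filter_eq_self.mpr (fun p hp => by simpa using hl p hp)
    have herase : (T.erase (PySem.Str.lower skill)).items = pre ++ post := by
      simp only [PySem.Dict.erase, hitems, List.filter_append, hfil pre hpre, hfil post hpost,
        List.filter_cons]
      simp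
    have hknotin : PySem.Str.lower skill ∉ (pre ++ post).map Prod.fst := by
      simp only [List.map_append, List.mem_append, List.mem_map]
      rintro (⟨p, hp, he⟩ | ⟨p, hp, he⟩)
      · exact hpre p hp he
      · exact hpost p hp he
    have hc' : (T.erase (PySem.Str.lower skill)).contains (PySem.Str.lower skill) = false :=
      pv_dict_contains_false (by rw [herase]; exact hknotin)
    have hB : pvBStep (pvFirstMap P0) (pvFirstMap O0) (T, tk) skill =
        (PySem.Dict.mk (pre ++ post ++ [(PySem.Str.lower skill, v)]), tk) := by
      unfold pvBStep
      simp only [PySem.Dict.pop?, hg, Option.map_some]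
      simp only [PySem.Dict.insert, hc', herase]
      simp
    have hval : PySem.Str.lower v = PySem.Str.lower skill :=
      h4 (PySem.Str.lower skill, v) (by simp [hitems])
    have hkkeys : PySem.Str.lower skill ∈ T.items.map Prod.fst := by simp [hitems]
    have hexk : PySem.Str.lower skill ∈ ex := (h3 _).mpr (h7 _ hkkeys)
    have hvals : T.values = pre.map Prod.snd ++ v :: post.map Prod.snd := by
      simp [PySem.Dict.values, hitems]
    have hnm : ∀ y ∈ (post.map Prod.snd).reverse, PySem.Str.lower y ≠ PySem.Str.lower skill := by
      intro y hy
      simp only [List.mem_reverse, List.mem_map] at hy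
      obtain ⟨p, hp, rfl⟩ := hy
      rw [h4 p (by simp [hitems, hp])]
      exact hpost p hp
    have hext : pvExtractFirst (PySem.Str.lower skill)
        (T.values.reverse ++ pvRemoveFirsts P0 (pvFromPrim T tk)) =
        some (v, (post.map Prod.snd).reverse ++
          ((pre.map Prod.snd).reverse ++ pvRemoveFirsts P0 (pvFromPrim T tk))) := by
      rw [hvals]
      simp only [List.reverse_append, List.reverse_cons, List.append_assoc]
      rw [pv_ef_append_nomatch hnm]
      simp [pvExtractFirst, hval]
    have hA : pvAStep (T.values.reverse ++ pvRemoveFirsts P0 (pvFromPrim T tk),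
        pvRemoveFirsts O0 tk, ex) skill =
        (v :: ((post.map Prod.snd).reverse ++
          ((pre.map Prod.snd).reverse ++ pvRemoveFirsts P0 (pvFromPrim T tk))),
         pvRemoveFirsts O0 tk, ex) := by
      unfold pvAStep
      simp only [if_pos (pv_set_mem_contains.mpr hexk), hext]
    rw [hA, hB]
    have hRF : pvRemoveFirsts P0 (pvFromPrim (PySem.Dict.mk
          (pre ++ post ++ [(PySem.Str.lower skill, v)])) tk) =
        pvRemoveFirsts P0 (pvFromPrim T tk) := by
      apply pv_rf_congr
      intro x
      rw [pv_mem_fromPrim, pv_mem_fromPrim, hitems]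
      simp only [List.map_append, List.map_cons, List.map_nil, List.mem_append, List.mem_cons,
        List.not_mem_nil, or_false]
      tauto
    refine ⟨?_, rfl, h3, ?_, ?_, ?_, ?_⟩
    · simp only [hRF]
      simp [PySem.Dict.values, List.map_append]
    · intro p hp
      apply h4
      simp only [hitems]
      simp only [List.mem_append, List.mem_cons, List.mem_singleton] at hp ⊢
      tauto
    · have hperm : ((pre ++ post ++ [(PySem.Str.lower skill, v)]).map Prod.fst).Perm
          (pre.map Prod.fst ++ PySem.Str.lower skill :: post.map Prod.fst) := by
        simp only [List.map_append, List.map_cons, List.map_nil]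
        rw [List.append_assoc]
        exact List.Perm.append_left _ (List.perm_append_comm)
      exact hperm.nodup_iff.mpr hnodup0
    · intro x hx
      obtain ⟨hk1, hk2⟩ := h6 x hx
      refine ⟨?_, hk2⟩
      simp only [hitems, List.map_append, List.map_cons, List.mem_append, List.mem_cons] at hk1 ⊢
      simp at hk1 ⊢
      tauto
    · intro x hx
      apply h7
      simp only [hitems, List.map_append, List.map_cons, List.mem_append, List.mem_cons] at hx ⊢
      simp at hx ⊢
      tauto
  | none =>
    have hknotin : PySem.Str.lower skill ∉ T.items.map Prod.fst := pv_dict_get?_none_iff.mp hg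
    have hcT : T.contains (PySem.Str.lower skill) = false := pv_dict_contains_false hknotin
    have hktk : PySem.Str.lower skill ∉ tk := fun hx => hknotin (h6 _ hx).1
    by_cases hPk : PySem.Str.lower skill ∈ P0.map PySem.Str.lower
    · -- promote first matching element of primary to front
      obtain ⟨⟨v0, ys⟩, hef⟩ : ∃ p, pvExtractFirst (PySem.Str.lower skill) P0 = some p := by
        cases he : pvExtractFirst (PySem.Str.lower skill) P0 with
        | none => exact absurd (pv_ef_none_iff.mp he) (by simpa using hPk)
        | some p => exact ⟨p, rfl⟩
      have hfmg : (pvFirstMap P0).get? (PySem.Str.lower skill) = some v0 := by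
        rw [pv_fm_get, hef]; rfl
      have hfmc : (pvFirstMap P0).contains (PySem.Str.lower skill) = true := by
        rw [PySem.Dict.contains_eq_isSome_get?, hfmg]; rfl
      have hB : pvBStep (pvFirstMap P0) (pvFirstMap O0) (T, tk) skill =
          (PySem.Dict.mk (T.items ++ [(PySem.Str.lower skill, v0)]), tk) := by
        unfold pvBStep
        simp only [PySem.Dict.pop?, hg, Option.map_none, hfmc, if_pos, hfmg]
        simp [PySem.Dict.insert, hcT]
      have hexk : PySem.Str.lower skill ∈ ex := (h3 _).mpr (Or.inl hPk)
      have hkS : PySem.Str.lower skill ∉ pvFromPrim T tk := by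
        rw [pv_mem_fromPrim]; rintro ⟨hm, -⟩; exact hknotin hm
      have hnm : ∀ y ∈ T.values.reverse, PySem.Str.lower y ≠ PySem.Str.lower skill := by
        intro y hy he
        simp only [List.mem_reverse, PySem.Dict.values, List.mem_map] at hy
        obtain ⟨p, hp, rfl⟩ := hy
        exact hknotin (List.mem_map.mpr ⟨p, hp, (h4 p hp) ▸ he⟩)
      have hext : pvExtractFirst (PySem.Str.lower skill)
          (T.values.reverse ++ pvRemoveFirsts P0 (pvFromPrim T tk)) =
          some (v0, T.values.reverse ++
            pvRemoveFirsts P0 (PySem.Set.add (pvFromPrim T tk) (PySem.Str.lower skill))) := by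
        rw [pv_ef_append_nomatch hnm, pv_rf_extract_some hkS hef]
        rfl
      have hA : pvAStep (T.values.reverse ++ pvRemoveFirsts P0 (pvFromPrim T tk),
          pvRemoveFirsts O0 tk, ex) skill =
          (v0 :: (T.values.reverse ++
            pvRemoveFirsts P0 (PySem.Set.add (pvFromPrim T tk) (PySem.Str.lower skill))),
           pvRemoveFirsts O0 tk, ex) := by
        unfold pvAStep
        simp only [if_pos (pv_set_mem_contains.mpr hexk), hext]
      rw [hA, hB]
      have hRF : pvRemoveFirsts P0 (pvFromPrim (PySem.Dict.mk
            (T.items ++ [(PySem.Str.lower skill, v0)])) tk) =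
          pvRemoveFirsts P0 (PySem.Set.add (pvFromPrim T tk) (PySem.Str.lower skill)) := by
        apply pv_rf_congr
        intro x
        rw [pv_mem_fromPrim, pv_set_mem_add, pv_mem_fromPrim]
        simp only [List.map_append, List.mem_append, List.mem_map, List.map_cons,
          List.mem_singleton, List.map_nil]
        constructor
        · rintro ⟨hm | hm, hn⟩
          · exact Or.inl ⟨hm, hn⟩
          · exact Or.inr hm
        · rintro (⟨hm, hn⟩ | rfl)
          · exact ⟨Or.inl hm, hn⟩
          · exact ⟨Or.inr (by simp), hktk⟩
      refine ⟨?_, rfl, h3, ?_, ?_, ?_, ?_⟩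
      · simp only [hRF]
        simp [PySem.Dict.values, List.map_append]
      · intro p hp
        simp only [List.mem_append, List.mem_singleton] at hp
        rcases hp with hp | hp
        · exact h4 p hp
        · rw [hp]
          exact pv_ef_lower hef
      · simp only [List.map_append, List.map_cons, List.map_nil]
        rw [List.nodup_append]
        refine ⟨h5, by simp, ?_⟩
        intro a ha b hb he
        rw [List.mem_singleton.mp hb] at he
        exact hknotin (he ▸ ha)
      · intro x hx
        obtain ⟨hk1, hk2⟩ := h6 x hx
        exact ⟨by simp only [List.map_append, List.mem_append]; exact Or.inl hk1, hk2⟩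
      · intro x hx
        simp only [List.map_append, List.map_cons, List.map_nil, List.mem_append,
          List.mem_singleton] at hx
        rcases hx with hx | hx
        · exact h7 x hx
        · rw [hx]
          exact Or.inl hPk
    · -- not in primary: try other_skills
      have hfmcP : (pvFirstMap P0).contains (PySem.Str.lower skill) = false := by
        rw [PySem.Dict.contains_eq_isSome_get?, pv_fm_get,
          pv_ef_none_iff.mpr (by simpa using hPk)]
        rfl
      have hexk : PySem.Str.lower skill ∉ ex := by
        rw [h3]
        rintro (hx | hx)
        · exact hPk hx
        · exact hktk hx
      cases hefo : pvExtractFirst (PySem.Str.lower skill) O0 with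
      | some p =>
        obtain ⟨w, ys⟩ := p
        have hfmg : (pvFirstMap O0).get? (PySem.Str.lower skill) = some w := by
          rw [pv_fm_get, hefo]; rfl
        have hB : pvBStep (pvFirstMap P0) (pvFirstMap O0) (T, tk) skill =
            (PySem.Dict.mk (T.items ++ [(PySem.Str.lower skill, w)]),
             PySem.Set.add tk (PySem.Str.lower skill)) := by
          unfold pvBStep
          simp only [PySem.Dict.pop?, hg, Option.map_none, hfmcP, hfmg]
          simp [PySem.Dict.insert, hcT]
        have hexto : pvExtractFirst (PySem.Str.lower skill) (pvRemoveFirsts O0 tk) =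
            some (w, pvRemoveFirsts O0 (PySem.Set.add tk (PySem.Str.lower skill))) :=
          pv_rf_extract_some hktk hefo
        have hany : (pvRemoveFirsts O0 tk).any
            (fun s => PySem.Str.lower s == PySem.Str.lower skill) = true := by
          have := pv_ef_mem_of_some hexto
          simp only [List.mem_map] at this
          obtain ⟨s, hs, he⟩ := this
          exact List.any_eq_true.mpr ⟨s, hs, beq_iff_eq.mpr he⟩
        have hA : pvAStep (T.values.reverse ++ pvRemoveFirsts P0 (pvFromPrim T tk),
            pvRemoveFirsts O0 tk, ex) skill =
            (w :: (T.values.reverse ++ pvRemoveFirsts P0 (pvFromPrim T tk)),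
             pvRemoveFirsts O0 (PySem.Set.add tk (PySem.Str.lower skill)),
             PySem.Set.add ex (PySem.Str.lower skill)) := by
          unfold pvAStep
          simp only [if_neg (fun hc => hexk (pv_set_mem_contains.mp hc)), hany, if_pos, hexto]
        rw [hA, hB]
        have hRF : pvRemoveFirsts P0 (pvFromPrim (PySem.Dict.mk
              (T.items ++ [(PySem.Str.lower skill, w)]))
              (PySem.Set.add tk (PySem.Str.lower skill))) =
            pvRemoveFirsts P0 (pvFromPrim T tk) := by
          apply pv_rf_congr
          intro x
          rw [pv_mem_fromPrim, pv_mem_fromPrim]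
          simp only [List.map_append, List.mem_append, pv_set_mem_add]
          constructor
          · rintro ⟨hm | hm, hn⟩
            · exact ⟨hm, fun hx => hn (Or.inl hx)⟩
            · simp at hm
              exact absurd (Or.inr hm) hn
          · rintro ⟨hm, hn⟩
            refine ⟨Or.inl hm, ?_⟩
            rintro (hx | rfl)
            · exact hn hx
            · exact hknotin hm
        refine ⟨?_, rfl, ?_, ?_, ?_, ?_, ?_⟩
        · simp only [hRF]
          simp [PySem.Dict.values, List.map_append]
        · intro x
          rw [pv_set_mem_add, h3, pv_set_mem_add]
          tauto
        · intro p hp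
          simp only [List.mem_append, List.mem_singleton] at hp
          rcases hp with hp | hp
          · exact h4 p hp
          · rw [hp]
            exact pv_ef_lower hefo
        · simp only [List.map_append, List.map_cons, List.map_nil]
          rw [List.nodup_append]
          refine ⟨h5, by simp, ?_⟩
          intro a ha b hb he
          rw [List.mem_singleton.mp hb] at he
          exact hknotin (he ▸ ha)
        · intro x hx
          rw [pv_set_mem_add] at hx
          rcases hx with hx | rfl
          · obtain ⟨hk1, hk2⟩ := h6 x hx
            exact ⟨by simp only [List.map_append, List.mem_append]; exact Or.inl hk1, hk2⟩
          · exact ⟨by simp, hPk⟩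
        · intro x hx
          simp only [List.map_append, List.map_cons, List.map_nil, List.mem_append,
            List.mem_singleton] at hx
          rcases hx with hx | hx
          · rcases h7 x hx with h | h
            · exact Or.inl h
            · exact Or.inr (pv_set_mem_add.mpr (Or.inl h))
          · rw [hx]
            exact Or.inr (pv_set_mem_add.mpr (Or.inr rfl))
      | none =>
        have hfmg : (pvFirstMap O0).get? (PySem.Str.lower skill) = none := by
          rw [pv_fm_get, hefo]; rfl
        have hB : pvBStep (pvFirstMap P0) (pvFirstMap O0) (T, tk) skill = (T, tk) := by
          unfold pvBStep
          simp only [PySem.Dict.pop?, hg, Option.map_none, hfmcP, hfmg]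
          simp
        have hany : (pvRemoveFirsts O0 tk).any
            (fun s => PySem.Str.lower s == PySem.Str.lower skill) = false := by
          rw [List.any_eq_false]
          intro s hs
          simp only [beq_iff_eq]
          intro he
          have : pvExtractFirst (PySem.Str.lower skill) (pvRemoveFirsts O0 tk) = none :=
            pv_rf_extract_none hefo
          exact (pv_ef_none_iff.mp this) (List.mem_map.mpr ⟨s, hs, he⟩)
        have hA : pvAStep (T.values.reverse ++ pvRemoveFirsts P0 (pvFromPrim T tk),
            pvRemoveFirsts O0 tk, ex) skill =
            (T.values.reverse ++ pvRemoveFirsts P0 (pvFromPrim T tk),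
             pvRemoveFirsts O0 tk, ex) := by
          unfold pvAStep
          simp only [if_neg (fun hc => hexk (pv_set_mem_contains.mp hc)), hany]
          simp
        rw [hA, hB]
        exact ⟨rfl, rfl, h3, h4, h5, h6, h7⟩

theorem pv_init_inv (P0 O0 : List String) :
    pvInv P0 O0 (P0, O0, PySem.Set.ofList (P0.map PySem.Str.lower))
      (PySem.Dict.mk [], PySem.Set.empty) := by
  refine ⟨?_, ?_, ?_, by simp, by simp, ?_, by simp⟩
  · have h : pvRemoveFirsts P0 (pvFromPrim (PySem.Dict.mk []) PySem.Set.empty) = P0 :=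
      pv_rf_empty_pending (fun a ha => by rw [pv_mem_fromPrim] at ha; simpa using ha)
    simpa [PySem.Dict.values] using h.symm
  · exact (pv_rf_empty_pending (fun a ha => by simpa [PySem.Set.empty] using ha)).symm
  · intro x
    rw [PySem.Set.mem_ofList (P0.map PySem.Str.lower) x]
    simp [PySem.Set.empty]
  · intro x hx
    simp [PySem.Set.empty] at hx

theorem pv_fold_inv (P0 O0 : List String) (bs : List String)
    (a : List String × List String × PySem.Set String)
    (b : PySem.Dict String String × PySem.Set String) (h : pvInv P0 O0 a b) :
    pvInv P0 O0 (bs.foldl pvAStep a)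
      (bs.foldl (pvBStep (pvFirstMap P0) (pvFirstMap O0)) b) := by
  induction bs generalizing a b with
  | nil => exact h
  | cons x r ih => exact ih _ _ (pv_step_inv P0 O0 a b x h)

-- ===== VERDICT (by name: the statement is the Claim_ definition above) =====
theorem boost_domain_skills_v2_spec : Claim_equal_boost_domain_skills_v2 := by
  intro P O B _
  unfold Spec_boost_domain_skills_v2 boost_domain_skills_v2 boost_domain_skills_v2_alt
  by_cases hB : B.isEmpty
  · simp [hB]
  · simp only [hB]
    have h := pv_fold_inv P O B _ _ (pv_init_inv P O)
    obtain ⟨h1, h2, -⟩ := h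
    exact Prod.ext h1 h2
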